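-- pv_equiv track=rewrite | github.com/germanrud/python-algo-1 | parcial2023.py | columnas_repetidas2
-- ===== SOURCE A (Python) =====
-- def obtener_col_k_esima(mat:list[list[int]],k:int) -> list[int]:
--     columna:list[int] = []
--     for i in range(len(mat)):
--         columna.append(mat[i][k])
--     return columna
--
-- def convertir_lista_de_filas_en_lista_de_columnas(mat:list[list[int]]) -> list[list[int]]:
--     nueva_lista_de_cols:list[list[int]] = []
--     for i in range(len(mat[0])):
--         nueva_lista_de_cols.append(obtener_col_k_esima(mat,i))
--     return nueva_lista_de_cols
--
-- def columnas_repetidas2(mat:list[list[int]]) -> bool: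
--     estado = True
--     columnas_matriz:list[list[int]] = convertir_lista_de_filas_en_lista_de_columnas(mat)
--     mitad:int = int(len(columnas_matriz)/2)
--     for i in range(mitad):
--         if columnas_matriz[i]!=columnas_matriz[i+mitad]:
--             estado = False
--     return estado
-- ===== SOURCE B (Python) =====
-- def columnas_repetidas2(mat: list[list[int]]) -> bool:
--     mitad = len(mat[0]) // 2
--     return all(row[i] == row[i + mitad] for row in mat for i in range(mitad))
-- ===== Notes on version B (the rewrite author's own statement) =====
-- stated objective: simpler
-- what changed: Drops the transpose (list-of-columns) construction and the column-extraction helper entirely: B compares paired column entries directly, row by row, with one short-circuiting all(...) over the paired indices, yielding the same flag A accumulates.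
import Mathlib
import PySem

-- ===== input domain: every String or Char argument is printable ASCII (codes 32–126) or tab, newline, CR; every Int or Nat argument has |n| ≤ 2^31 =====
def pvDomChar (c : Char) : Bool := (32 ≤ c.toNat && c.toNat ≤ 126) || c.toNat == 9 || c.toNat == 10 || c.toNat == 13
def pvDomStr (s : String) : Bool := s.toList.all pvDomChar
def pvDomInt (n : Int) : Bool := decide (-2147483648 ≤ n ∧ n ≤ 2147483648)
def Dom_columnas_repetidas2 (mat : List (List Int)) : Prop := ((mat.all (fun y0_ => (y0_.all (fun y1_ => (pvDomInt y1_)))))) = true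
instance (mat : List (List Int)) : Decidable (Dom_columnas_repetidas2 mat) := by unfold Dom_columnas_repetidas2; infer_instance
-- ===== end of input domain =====

-- B drops A's transpose (list-of-columns) construction and compares the paired column entries directly, row by row (simpler decomposition; same result).

-- ===== PORT A =====
def obtener_col_k_esima (mat : List (List Int)) (k : Int) : List Int :=
  (PySem.List.pyRange 0 (PySem.List.len mat) 1).foldl
    (fun columna i => columna ++ [PySem.List.pyGetD (PySem.List.pyGetD mat i []) k 0]) []

def convertir_lista_de_filas_en_lista_de_columnas (mat : List (List Int)) : List (List Int) :=
  (PySem.List.pyRange 0 (PySem.List.len (PySem.List.pyGetD mat 0 [])) 1).foldl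
    (fun nueva i => nueva ++ [obtener_col_k_esima mat i]) []

def columnas_repetidas2 (mat : List (List Int)) : Bool :=
  let columnas_matriz := convertir_lista_de_filas_en_lista_de_columnas mat
  let mitad : Int := PySem.Int.truncdiv (PySem.List.len columnas_matriz) 2
  (PySem.List.pyRange 0 mitad 1).foldl
    (fun estado i =>
      if PySem.List.pyGetD columnas_matriz i [] ≠ PySem.List.pyGetD columnas_matriz (i + mitad) [] then
        false
      else estado) true

-- ===== PORT B =====
def columnas_repetidas2_alt (mat : List (List Int)) : Bool :=
  let mitad : Int := PySem.Int.floordiv (PySem.List.len (PySem.List.pyGetD mat 0 [])) 2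
  mat.all (fun row =>
    (PySem.List.pyRange 0 mitad 1).all (fun i =>
      PySem.List.pyGetD row i 0 == PySem.List.pyGetD row (i + mitad) 0))

-- ===== PRECONDITION & SPEC =====
-- Pre_ excludes exactly the inputs where the Python A raises IndexError: the empty matrix
-- (mat[0]) and matrices with a row shorter than the first row (mat[i][k] out of range).
def Pre_columnas_repetidas2 (mat : List (List Int)) : Prop :=
  mat ≠ [] ∧ ∀ row ∈ mat, (mat.headD []).length ≤ row.length
instance (mat : List (List Int)) : Decidable (Pre_columnas_repetidas2 mat) := by
  unfold Pre_columnas_repetidas2; infer_instance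

def pvWitness_columnas_repetidas2 : List (List Int) := [[1, 2, 1, 2], [3, 4, 3, 4]]

def Spec_columnas_repetidas2 (mat : List (List Int)) (out : Bool) : Prop := out = columnas_repetidas2_alt mat
instance (mat : List (List Int)) (out : Bool) : Decidable (Spec_columnas_repetidas2 mat out) := by unfold Spec_columnas_repetidas2; infer_instance

-- ===== CLAIM (what is proved, stated in full; the proofs are below) =====
def Claim_equal_columnas_repetidas2 : Prop := ∀ (mat : List (List Int)), Dom_columnas_repetidas2 mat → Pre_columnas_repetidas2 mat → Spec_columnas_repetidas2 mat (columnas_repetidas2 mat)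

-- ===== LEMMAS AND PROOFS =====

-- A's flag loop is an `all`: the flag ends true iff no iteration saw a mismatch.
theorem foldl_flag_eq_all {α : Type} (p : α → Prop) [DecidablePred p] (xs : List α) (b : Bool) :
    xs.foldl (fun estado i => if p i then false else estado) b
      = (b && xs.all (fun i => !(decide (p i)))) := by
  induction xs generalizing b with
  | nil => simp
  | cons x xs ih =>
    simp only [List.foldl_cons, List.all_cons, ih]
    by_cases hx : p x <;> simp [hx]

-- A's column extractor builds exactly the k-th-entry map over the rows.
theorem obtener_col_eq (mat : List (List Int)) (k : Int) :
    obtener_col_k_esima mat k = mat.map (fun row => PySem.List.pyGetD row k 0) := by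
  unfold obtener_col_k_esima
  rw [PySem.List.foldl_append_singleton_eq_map]
  have : (fun i => PySem.List.pyGetD (PySem.List.pyGetD mat i ([] : List Int)) k 0)
       = (fun row => PySem.List.pyGetD row k 0) ∘ (fun i => PySem.List.pyGetD mat i []) := rfl
  rw [this, ← List.map_map, PySem.List.map_pyGetD_pyRange_zero]
  simp

-- A's transpose is the map of the column maps over the column indices.
theorem convertir_eq (mat : List (List Int)) :
    convertir_lista_de_filas_en_lista_de_columnas mat
      = (PySem.List.pyRange 0 (PySem.List.len (PySem.List.pyGetD mat 0 [])) 1).map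
          (fun k => mat.map (fun row => PySem.List.pyGetD row k 0)) := by
  unfold convertir_lista_de_filas_en_lista_de_columnas
  rw [PySem.List.foldl_append_singleton_eq_map]
  simp [obtener_col_eq]

-- ===== VERDICT (by name: the statement is the Claim_ definition above) =====
theorem columnas_repetidas2_spec : Claim_equal_columnas_repetidas2 := by
  intro mat _ _
  unfold Spec_columnas_repetidas2
  simp only [columnas_repetidas2, columnas_repetidas2_alt, convertir_eq]
  set r0 : List Int := PySem.List.pyGetD mat 0 [] with hr0
  set colF : Int → List Int := fun k => mat.map (fun row => PySem.List.pyGetD row k 0) with hcolF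
  have hlen : PySem.List.len ((PySem.List.pyRange 0 (PySem.List.len r0) 1).map colF)
      = (r0.length : Int) := by
    simp [PySem.List.len_eq, PySem.List.pyRange_zero_natCast]
  have htr : PySem.Int.truncdiv ((r0.length : Nat) : Int) 2 = ((r0.length / 2 : Nat) : Int) := by
    simp [PySem.Int.truncdiv]
  have hfl : PySem.Int.floordiv (PySem.List.len r0) 2 = ((r0.length / 2 : Nat) : Int) := by
    simp [PySem.List.len_eq]
  rw [hlen, htr, hfl]
  have hn0 : PySem.List.len r0 = ((r0.length : Nat) : Int) := by simp [PySem.List.len_eq]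
  rw [hn0]
  set h : Nat := r0.length / 2 with hh
  have hcongr :
      (PySem.List.pyRange 0 ((h : Nat) : Int) 1).foldl
        (fun estado i =>
          if PySem.List.pyGetD ((PySem.List.pyRange 0 ((r0.length : Nat) : Int) 1).map colF) i [] ≠
              PySem.List.pyGetD ((PySem.List.pyRange 0 ((r0.length : Nat) : Int) 1).map colF) (i + (h : Int)) [] then
            false
          else estado) true
      = (PySem.List.pyRange 0 ((h : Nat) : Int) 1).foldl
        (fun estado i => if colF i ≠ colF (i + (h : Int)) then false else estado) true := by
    apply PySem.List.foldl_congr_mem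
    intro acc i hi
    have hb := PySem.List.mem_pyRange_one.mp hi
    have hhle : h ≤ r0.length := Nat.div_le_self _ _
    rw [PySem.List.pyGetD_map_pyRange_of_nonneg colF _ i [] hb.1 (by omega),
        PySem.List.pyGetD_map_pyRange_of_nonneg colF _ (i + (h : Int)) [] (by omega)
          (by omega)]
  rw [hcongr, foldl_flag_eq_all (fun i => colF i ≠ colF (i + (h : Int)))]
  rw [Bool.eq_iff_iff]
  simp only [Bool.true_and, List.all_eq_true, Bool.not_eq_eq_eq_not, Bool.not_true,
    decide_eq_false_iff_not, not_not, beq_iff_eq, hcolF, List.map_inj_left]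
  constructor
  · intro hA row hrow i hi; exact hA i hi row hrow
  · intro hB i hi row hrow; exact hB row hrow i hi
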